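/-
  TEST of UserX/Code.lean: the code of one function of the image (`error`, 41 bytes, 13 instructions) as a byte list,
  swept by the model's decoder, and one `User.Step` obtained from "the function is in memory at `base`" — through a small
  tactic that shows how a stepper uses the look-up (`User.codeInsnAt`: offset ↦ length and decode fact) and the number
  form of the code (`code_error.nat`, `code_error.spec`, `Step.of_codeNat`).
-/
import UserX.Code
namespace X86.User.CodeTest
open X86 X86.User

-- error: 41 bytes, at 0x1000a0
#code_bytes code_error
  "55534883ec084889fb89f5488dbf8c000000e8b2b9000089ab8c000000b8000000"
  "004883c4085b5dc3"
#code_sweep code_error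

open Lean Meta Elab Tactic in
/-- `code_step h off hrip`: the goal `Step L μ u Q` for the instruction at offset `off` of the function whose `HasCode`
hypothesis is `h`, given `hrip : u.rip = base + UInt64.ofNat off`. Leaves the body's `wpUser` goal. -/
elab "code_step " h:ident off:num hrip:ident : tactic => withMainContext do
  let hE ← elabTerm h none
  let hT ← whnfR (← instantiateMVars (← inferType hE))
  unless hT.isAppOfArity ``X86.User.HasCode 4 do throwError "not a HasCode hypothesis: {hT}"
  let some codeName := (hT.getArg! 3).constName? | throwError "the code is not a constant: {hT.getArg! 3}"
  let (_, fact) ← codeInsnAt codeName off.getNat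
  let factId := mkIdent fact
  let specId := mkIdent (codeName.str "spec")
  evalTactic (← `(tactic|
    refine Step.of_codeNat (HasCode.toNat $h $specId) $off (@$factId) $hrip (by decide) (by rfl) (by rfl) ?_))

open Lean Meta Elab Tactic in
/-- The same through the list form (`Step.of_code`). -/
elab "code_step_list " h:ident off:num hrip:ident : tactic => withMainContext do
  let hE ← elabTerm h none
  let hT ← whnfR (← instantiateMVars (← inferType hE))
  let some codeName := (hT.getArg! 3).constName? | throwError "the code is not a constant: {hT.getArg! 3}"
  let (_, fact) ← codeInsnAt codeName off.getNat
  let factId := mkIdent fact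
  evalTactic (← `(tactic| refine Step.of_code $h $off (@$factId) $hrip (by decide) (by rfl) (by rfl) ?_))

variable {L : Layout} {μ : Microarch} {u : State}

/-- `sub rsp, 8` at offset 2 of `error`, wherever `error` is linked. -/
example (base : Word) (Q : State → Prop) (h : HasCode L u base code_error) (hrip : u.rip = base + UInt64.ofNat 2)
    (hw : ∀ m, Abs L m u →
      Sem.wpUser L μ
        (Insn.SUB.sub { rex := true, rexW := true, modrmMod := some 3, modrm := some 236, opcode := 131, len := 4 }
          (Operand.reg Width.w64 (Dec.gpr 4)) (Operand.imm (Word.sext 8 8)))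
        (fun _ u' => Q u') (fun _ _ => False) (u.setRip (u.rip + 4))) :
    Step L μ u Q := by
  code_step h 2 hrip
  exact hw

/-- The same from the list itself (`Step.of_code`: `List.drop` evaluated; only for small functions). -/
example (base : Word) (Q : State → Prop) (h : HasCode L u base code_error) (hrip : u.rip = base + UInt64.ofNat 38)
    (hw : ∀ m, Abs L m u →
      Sem.wpUser L μ (Insn.POP.pop { opcode := 91, len := 1 } (Operand.reg Width.w64 (Dec.gpr 3)))
        (fun _ u' => Q u') (fun _ _ => False) (u.setRip (u.rip + 1))) :
    Step L μ u Q := by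
  code_step_list h 38 hrip
  exact hw

/-- `call rel32` at offset 18. -/
example (base : Word) (Q : State → Prop) (h : HasCode L u base code_error) (hrip : u.rip = base + UInt64.ofNat 18)
    (hw : ∀ m, Abs L m u →
      Sem.wpUser L μ (Insn.CALL.callRel { opcode := 232, len := 5 } (Word.sext 47538 32))
        (fun _ u' => Q u') (fun _ _ => False) (u.setRip (u.rip + 5))) :
    Step L μ u Q := by
  code_step h 18 hrip
  exact hw

end X86.User.CodeTest
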